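-- pv_equiv track=rewrite | github.com/mittgaurav/Pietone | graph_operations_2.py | shortest_return_no_repeat_backtrack
-- ===== SOURCE A (Python) =====
-- def shortest_return_no_repeat_backtrack(s):
--     """Given string of NESW direction, gives the shortest path back
--     to the starting point without taking any node/edge of before"""
--     from collections import deque
--
--     if not s: return ''
--
--     # Find nodes traversed in onward journey
--     # and the ending point. Starts at origin
--     visited = set()
--     prev = (0, 0)
--     for c in s:
--         if c == 'N': prev = (prev[0], prev[1] + 1)
--         if c == 'S': prev = (prev[0], prev[1] - 1)
--         if c == 'E': prev = (prev[0] + 1, prev[1])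
--         if c == 'W': prev = (prev[0] - 1, prev[1])
--         visited.add(prev)
--
--     # backtrack generates the path
--     # instead of storing it inline
--     def backtrack(parents, next):
--         if not parents: return ''
--         s = ''
--         while next in parents:
--             diff = (next[0] - parents[next][0], next[1] - parents[next][1])
--             if diff == (0, 1): s += 'N'
--             if diff == (0, -1): s += 'S'
--             if diff == (1, 0): s += 'E'
--             if diff == (-1, 0): s += 'W'
--             next = parents[next]
--
--         return "".join(reversed(s))
--
--     def backtrack2(parents, next):
--         if next not in parents: return ''
--         s = ''
--         diff = (next[0] - parents[next][0], next[1] - parents[next][1])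
--         if diff == (0, 1): s += 'N'
--         if diff == (0, -1): s += 'S'
--         if diff == (1, 0): s += 'E'
--         if diff == (-1, 0): s += 'W'
--         return backtrack2(parents, parents[next]) + s
--
--     parents = {}
--     q = deque()
--     q.append(prev)
--     while q:
--         node = q.popleft()
--         for i, j, c in [[0, 1, 'N'], [0, -1, 'S'], [-1, 0, 'W'], [1, 0, 'E']]:
--             next = (node[0] + i, node[1] + j)
--             if next in visited: continue
--             parents[next] = node
--             if next == (0, 0):
--                 # reached (0,0), so backtrack
--                 # to generate the entire path
--                 assert backtrack(parents, next) == backtrack2(parents, next)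
--                 return backtrack2(parents, next)
--             q.append(next)
--             visited.add(next)
--
--     return 'ERROR'
-- ===== SOURCE B (Python) =====
-- def shortest_return_no_repeat_backtrack(s):
--     """Same task, different decomposition: the onward walk is a prefix-sum
--     trail via a delta table, and the BFS runs level by level carrying the
--     partial path, so no deque, no parents map and no backtracking helpers."""
--     if not s:
--         return ''
--
--     delta = {'N': (0, 1), 'S': (0, -1), 'E': (1, 0), 'W': (-1, 0)}
--     x = y = 0
--     trail = []
--     for c in s:
--         dx, dy = delta.get(c, (0, 0))
--         x += dx
--         y += dy
--         trail.append((x, y))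
--     visited = set(trail)
--
--     frontier = [((x, y), '')]
--     while frontier:
--         nxt = []
--         for node, path in frontier:
--             for c in 'NSWE':
--                 dx, dy = delta[c]
--                 cell = (node[0] + dx, node[1] + dy)
--                 if cell in visited:
--                     continue
--                 if cell == (0, 0):
--                     return path + c
--                 visited.add(cell)
--                 nxt.append((cell, path + c))
--         frontier = nxt
--     return 'ERROR'
-- ===== Notes on version B (the rewrite author's own statement) =====
-- stated objective: simpler
-- what changed: B computes the onward walk as a prefix-sum trail over a delta table (instead of four sequential ifs plus incremental set.add) and runs the BFS level by level over plain lists carrying the partial path in each frontier entry, so the deque, the parents dict, both recursive backtracking helpers and the assert disappear.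
import Mathlib
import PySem

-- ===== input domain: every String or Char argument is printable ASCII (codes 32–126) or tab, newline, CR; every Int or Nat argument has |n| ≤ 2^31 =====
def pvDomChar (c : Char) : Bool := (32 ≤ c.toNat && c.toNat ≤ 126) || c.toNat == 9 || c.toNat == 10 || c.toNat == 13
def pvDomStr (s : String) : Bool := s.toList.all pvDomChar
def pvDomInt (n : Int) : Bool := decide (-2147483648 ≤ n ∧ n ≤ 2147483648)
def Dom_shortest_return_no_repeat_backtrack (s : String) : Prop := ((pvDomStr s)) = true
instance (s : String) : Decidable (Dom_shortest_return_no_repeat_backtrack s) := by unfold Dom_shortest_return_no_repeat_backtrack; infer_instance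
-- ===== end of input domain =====

-- B replaces A's four-if walk + deque BFS + parents dict + recursive backtracking by a
-- delta-table prefix-sum trail and a level-by-level BFS that carries the partial path
-- (simpler decomposition; same exploration order, hence the same return value).

-- ===== PORT A =====
-- the body of A's first for-loop: the four sequential ifs updating prev
def saStep (prev : Int × Int) (c : Char) : Int × Int :=
  let p1 := if c = 'N' then (prev.1, prev.2 + 1) else prev
  let p2 := if c = 'S' then (p1.1, p1.2 - 1) else p1
  let p3 := if c = 'E' then (p2.1 + 1, p2.2) else p2
  if c = 'W' then (p3.1 - 1, p3.2) else p3

-- A's first loop: visited set and the endpoint prev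
def saWalk : List Char → PySem.Set (Int × Int) → (Int × Int) → PySem.Set (Int × Int) × (Int × Int)
  | [], v, prev => (v, prev)
  | c :: cs, v, prev =>
    let p := saStep prev c
    saWalk cs (v.add p) p

-- the char-building block of backtrack2 (the four ifs on diff)
def saDiffStr (next par : Int × Int) : String :=
  let d : Int × Int := (next.1 - par.1, next.2 - par.2)
  let s0 := ""
  let s1 := if d = ((0 : Int), (1 : Int)) then s0 ++ "N" else s0
  let s2 := if d = ((0 : Int), (-1 : Int)) then s1 ++ "S" else s1
  let s3 := if d = ((1 : Int), (0 : Int)) then s2 ++ "E" else s2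
  if d = ((-1 : Int), (0 : Int)) then s3 ++ "W" else s3

-- backtrack2; fuel only makes the recursion on the parents chain structural
-- (one entry of the chain per step, so parents.size + 1 fuel is never exhausted).
-- backtrack and the assert are not ported: both helpers compute the same string,
-- so the Python assert never fires.
def saBt : Nat → PySem.Dict (Int × Int) (Int × Int) → (Int × Int) → String
  | 0, _, _ => ""
  | fuel + 1, parents, next =>
    match parents.get? next with
    | none => ""
    | some par => saBt fuel parents par ++ saDiffStr next par

def saDirs : List (Int × Int × Char) :=
  [((0 : Int), (1 : Int), 'N'), (0, -1, 'S'), (-1, 0, 'W'), (1, 0, 'E')]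

-- the inner for-loop over the four directions (early return = some)
def saInner (node : Int × Int) :
    List (Int × Int × Char) → PySem.Set (Int × Int) → PySem.Dict (Int × Int) (Int × Int) →
    List (Int × Int) →
    Option String × PySem.Set (Int × Int) × PySem.Dict (Int × Int) (Int × Int) × List (Int × Int)
  | [], v, parents, q => (none, v, parents, q)
  | (i, j, _c) :: rest, v, parents, q =>
    let next : Int × Int := (node.1 + i, node.2 + j)
    if v.contains next then saInner node rest v parents q
    else
      let parents' := parents.insert next node
      if next = (0, 0) then (some (saBt (parents'.size + 1) parents' next), v, parents', q)
      else saInner node rest (v.add next) parents' (q ++ [next])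

-- the while loop; fuel bounds the number of pops (it only totalizes the python loop)
def saBfs : Nat → PySem.Set (Int × Int) → PySem.Dict (Int × Int) (Int × Int) → List (Int × Int) → String
  | _, _, _, [] => "ERROR"
  | 0, _, _, _ :: _ => "ERROR"
  | fuel + 1, v, parents, node :: q =>
    match saInner node saDirs v parents q with
    | (some r, _, _, _) => r
    | (none, v', parents', q') => saBfs fuel v' parents' q'

def shortest_return_no_repeat_backtrack (s : String) : String :=
  if s = "" then ""
  else
    let vp := saWalk s.toList PySem.Set.empty (0, 0)
    saBfs ((20 * s.toList.length + 50) ^ 2) vp.1 PySem.Dict.empty [vp.2]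

-- ===== PORT B =====
-- the python dict literal delta (distinct literal keys → Dict.mk of the pairs)
def sbDelta : PySem.Dict Char (Int × Int) :=
  PySem.Dict.mk [('N', ((0 : Int), (1 : Int))), ('S', (0, -1)), ('E', (1, 0)), ('W', (-1, 0))]

-- B's first loop: running position (x, y) with delta.get(c, (0, 0)), trail appended
def sbTrail : List Char → (Int × Int) → List (Int × Int) → (Int × Int) × List (Int × Int)
  | [], xy, trail => (xy, trail)
  | c :: cs, xy, trail =>
    let d := sbDelta.getD c (0, 0)
    let xy' : Int × Int := (xy.1 + d.1, xy.2 + d.2)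
    sbTrail cs xy' (trail ++ [xy'])

-- inner "for c in 'NSWE'" loop; delta[c] ported as getD (c is always a key here)
def sbExpand (node : Int × Int) (path : String) :
    List Char → PySem.Set (Int × Int) → List ((Int × Int) × String) →
    Option String × PySem.Set (Int × Int) × List ((Int × Int) × String)
  | [], v, nxt => (none, v, nxt)
  | c :: cs, v, nxt =>
    let d := sbDelta.getD c (0, 0)
    let cell : Int × Int := (node.1 + d.1, node.2 + d.2)
    if v.contains cell then sbExpand node path cs v nxt
    else if cell = (0, 0) then (some (path ++ c.toString), v, nxt)
    else sbExpand node path cs (v.add cell) (nxt ++ [(cell, path ++ c.toString)])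

-- one BFS level: "for node, path in frontier"; the fuel (one unit per node, shared
-- with the outer loop) only totalizes the python while-loop
def sbLevel (f : Nat) (v : PySem.Set (Int × Int))
    (rest nxt : List ((Int × Int) × String)) :
    Option String × Nat × PySem.Set (Int × Int) × List ((Int × Int) × String) :=
  match rest, f with
  | [], _ => (none, f, v, nxt)
  | _ :: _, 0 => (some "ERROR", 0, v, [])
  | (node, path) :: rest, f + 1 =>
    match sbExpand node path "NSWE".toList v nxt with
    | (some r, v', nxt') => (some r, f, v', nxt')
    | (none, v', nxt') => sbLevel f v' rest nxt'

-- definitional equations of sbLevel (rfl; named so proofs can cite them)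
theorem sbLevel_nil (f : Nat) (v : PySem.Set (Int × Int))
    (nxt : List ((Int × Int) × String)) : sbLevel f v [] nxt = (none, f, v, nxt) := by
  simp [sbLevel]

theorem sbLevel_zero (v : PySem.Set (Int × Int)) (node : Int × Int) (path : String)
    (rest nxt : List ((Int × Int) × String)) :
    sbLevel 0 v ((node, path) :: rest) nxt = (some "ERROR", 0, v, []) := by
  simp [sbLevel]

theorem sbLevel_succ (f : Nat) (v : PySem.Set (Int × Int)) (node : Int × Int) (path : String)
    (rest nxt : List ((Int × Int) × String)) :
    sbLevel (f + 1) v ((node, path) :: rest) nxt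
      = match sbExpand node path "NSWE".toList v nxt with
        | (some r, v', nxt') => (some r, f, v', nxt')
        | (none, v', nxt') => sbLevel f v' rest nxt' := by
  simp [sbLevel]

-- fuel bookkeeping for sbLoop's termination
theorem sbLevel_fuel_le : ∀ (rest : List ((Int × Int) × String)) (f : Nat)
    (v : PySem.Set (Int × Int)) (nxt : List ((Int × Int) × String))
    (f' : Nat) (v' : PySem.Set (Int × Int)) (nxt' : List ((Int × Int) × String)),
    sbLevel f v rest nxt = (none, f', v', nxt') → f' ≤ f := by
  intro rest
  induction rest with
  | nil =>
    intro f v nxt f' v' nxt' h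
    rw [sbLevel_nil] at h
    injection h with h1 h2
    injection h2 with h2 h3
    exact le_of_eq h2.symm
  | cons p rest ih =>
    intro f v nxt f' v' nxt' h
    obtain ⟨node, path⟩ := p
    cases f with
    | zero => rw [sbLevel_zero] at h; exact absurd h (by simp)
    | succ f =>
      rw [sbLevel_succ] at h
      rcases he : sbExpand node path "NSWE".toList v nxt with ⟨o, v2, nxt2⟩
      rw [he] at h
      cases o with
      | some r => simp at h
      | none => exact le_trans (ih f v2 nxt2 f' v' nxt' h) (Nat.le_succ f)

theorem sbLevel_fuel_lt : ∀ (p : (Int × Int) × String) (rest : List ((Int × Int) × String))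
    (f : Nat) (v : PySem.Set (Int × Int)) (nxt : List ((Int × Int) × String))
    (f' : Nat) (v' : PySem.Set (Int × Int)) (nxt' : List ((Int × Int) × String)),
    sbLevel f v (p :: rest) nxt = (none, f', v', nxt') → f' < f := by
  intro p rest f v nxt f' v' nxt' h
  obtain ⟨node, path⟩ := p
  cases f with
  | zero => rw [sbLevel_zero] at h; exact absurd h (by simp)
  | succ f =>
    rw [sbLevel_succ] at h
    rcases he : sbExpand node path "NSWE".toList v nxt with ⟨o, v2, nxt2⟩
    rw [he] at h
    cases o with
    | some r => simp at h
    | none => exact Nat.lt_succ_of_le (sbLevel_fuel_le rest f v2 nxt2 f' v' nxt' h)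

-- the while loop: run one level, continue with the next frontier
def sbLoop (f : Nat) (v : PySem.Set (Int × Int))
    (frontier : List ((Int × Int) × String)) : String :=
  match frontier with
  | [] => "ERROR"
  | p :: fr =>
    match h : sbLevel f v (p :: fr) [] with
    | (some r, _, _, _) => r
    | (none, f', v', nxt) => sbLoop f' v' nxt
termination_by f
decreasing_by exact sbLevel_fuel_lt p fr f v [] _ _ _ h

def shortest_return_no_repeat_backtrack_alt (s : String) : String :=
  if s = "" then ""
  else
    let pt := sbTrail s.toList (0, 0) []
    sbLoop ((20 * s.toList.length + 50) ^ 2) (PySem.Set.ofList pt.2) [(pt.1, "")]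

-- ===== PRECONDITION & SPEC =====
-- No Pre_: the fueled ports agree on every input (both spend one fuel unit per popped
-- node and start with the same fuel). On inputs whose BFS never reaches the origin and
-- never exhausts the frontier the PYTHON programs both loop forever (no return value
-- is claimed there; the ports return "ERROR" when the shared fuel runs out).
def Spec_shortest_return_no_repeat_backtrack (s : String) (out : String) : Prop := out = shortest_return_no_repeat_backtrack_alt s
instance (s : String) (out : String) : Decidable (Spec_shortest_return_no_repeat_backtrack s out) := by unfold Spec_shortest_return_no_repeat_backtrack; infer_instance

-- ===== CLAIM (what is proved, stated in full; the proofs are below) =====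
def Claim_equal_shortest_return_no_repeat_backtrack : Prop := ∀ (s : String), Dom_shortest_return_no_repeat_backtrack s → Spec_shortest_return_no_repeat_backtrack s (shortest_return_no_repeat_backtrack s)

-- ===== LEMMAS AND PROOFS =====
-- The fueled ports agree on EVERY input: both spend one fuel unit per popped node
-- and start with the same fuel, so they run out (or return) together.

-- the parents chain from n down to the BFS start, its reconstructed string and length;
-- every node on the chain lies in w (so inserting a key outside w leaves it intact)
inductive SChain (parents : PySem.Dict (Int × Int) (Int × Int)) (w : List (Int × Int)) :
    (Int × Int) → String → Nat → Prop where
  | base (n : Int × Int) (h : parents.get? n = none) (hn : n ∈ w) : SChain parents w n "" 0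
  | step (n m : Int × Int) (p : String) (k : Nat) (h : parents.get? n = some m) (hn : n ∈ w)
      (hc : SChain parents w m p k) : SChain parents w n (p ++ saDiffStr n m) (k + 1)

theorem schain_mono {parents : PySem.Dict (Int × Int) (Int × Int)} {w w' : List (Int × Int)}
    {n : Int × Int} {p : String} {k : Nat} (hw : ∀ x ∈ w, x ∈ w')
    (h : SChain parents w n p k) : SChain parents w' n p k := by
  induction h with
  | base n h hn => exact .base n h (hw _ hn)
  | step n m p k h hn _ ih => exact .step n m p k h (hw _ hn) ih

theorem schain_insert {parents : PySem.Dict (Int × Int) (Int × Int)} {w : List (Int × Int)}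
    {n x v : Int × Int} {p : String} {k : Nat} (hx : x ∉ w)
    (h : SChain parents w n p k) : SChain (parents.insert x v) w n p k := by
  induction h with
  | base n h hn =>
    exact .base n (by rw [PySem.Dict.get?_insert_of_ne _ _ (fun he => hx (by rw [← he]; exact hn))]; exact h) hn
  | step n m p k h hn _ ih =>
    exact .step n m p k
      (by rw [PySem.Dict.get?_insert_of_ne _ _ (fun he => hx (by rw [← he]; exact hn))]; exact h) hn ih

theorem saBt_eval {parents : PySem.Dict (Int × Int) (Int × Int)} {w : List (Int × Int)}
    {n : Int × Int} {p : String} {k : Nat} (h : SChain parents w n p k) :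
    ∀ fuel, k < fuel → saBt fuel parents n = p := by
  induction h with
  | base n h hn =>
    intro fuel hf
    match fuel, hf with
    | f + 1, _ => simp [saBt, h]
  | step n m p k h hn hc ih =>
    intro fuel hf
    match fuel, hf with
    | f + 1, hf => simp only [saBt, h]; rw [ih f (by omega)]

theorem saDirs_diff : ∀ d ∈ saDirs, ∀ node : Int × Int,
    saDiffStr (node.1 + d.1, node.2 + d.2.1) node = d.2.2.toString := by
  intro d hd node
  fin_cases hd <;> simp [saDiffStr, Prod.ext_iff] <;> decide

theorem saDirs_delta : ∀ d ∈ saDirs, sbDelta.getD d.2.2 ((0 : Int), (0 : Int)) = (d.1, d.2.1) := by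
  intro d hd
  fin_cases hd <;> decide

-- saInner and sbExpand track each other: same early return, same visited set, the new
-- queue entries carry valid parents chains
theorem expand_sim (dirs : List (Int × Int × Char)) (node : Int × Int) (path : String)
    (v : PySem.Set (Int × Int)) (parents : PySem.Dict (Int × Int) (Int × Int))
    (pre : List (Int × Int)) (nxt ents : List ((Int × Int) × String)) (k : Nat)
    (hdiff : ∀ d ∈ dirs, ∀ nd : Int × Int, saDiffStr (nd.1 + d.1, nd.2 + d.2.1) nd = d.2.2.toString)
    (hdelta : ∀ d ∈ dirs, sbDelta.getD d.2.2 ((0 : Int), (0 : Int)) = (d.1, d.2.1))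
    (hent : ∀ e ∈ ents, ∃ j, SChain parents v e.1 e.2 j ∧ j ≤ parents.size)
    (hnxt : ∀ e ∈ nxt, e ∈ ents)
    (hkeys : ∀ x ∈ parents.keys, x ∈ v)
    (hnode : SChain parents v node path k) (hk : k ≤ parents.size) :
    match saInner node dirs v parents (pre ++ nxt.map Prod.fst),
          sbExpand node path (dirs.map (fun d => d.2.2)) v nxt with
    | (some r, _, _, _), (some r', _, _) => r = r'
    | (none, v1, p1, q1), (none, v1', q1') =>
        v1 = v1' ∧ q1 = pre ++ q1'.map Prod.fst ∧
        (∀ e, e ∈ ents ∨ e ∈ q1' → ∃ j, SChain p1 v1 e.1 e.2 j ∧ j ≤ p1.size) ∧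
        (∀ x ∈ p1.keys, x ∈ v1)
    | _, _ => False := by
  induction dirs generalizing v parents nxt ents k with
  | nil => exact ⟨rfl, rfl, fun e he => hent e (he.elim id (hnxt e)), hkeys⟩
  | cons d rest ih =>
    obtain ⟨i, j, c⟩ := d
    have hdc : sbDelta.getD c ((0 : Int), (0 : Int)) = (i, j) :=
      hdelta (i, j, c) List.mem_cons_self
    by_cases hcont : v.contains ((node.1 + i, node.2 + j) : Int × Int) = true
    · simp only [saInner, sbExpand, List.map_cons, hdc, hcont, if_true]
      exact ih _ _ _ _ _ (fun d hd => hdiff d (List.mem_cons_of_mem _ hd))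
        (fun d hd => hdelta d (List.mem_cons_of_mem _ hd)) hent hnxt hkeys hnode hk
    · have hnext : ((node.1 + i, node.2 + j) : Int × Int) ∉ v := by
        simpa [PySem.Set.contains] using hcont
      have hfreshk : parents.contains ((node.1 + i, node.2 + j) : Int × Int) = false := by
        cases h : parents.contains ((node.1 + i, node.2 + j) : Int × Int) with
        | false => rfl
        | true => exact absurd (hkeys _ ((PySem.Dict.contains_iff_mem_keys _ _).1 h)) hnext
      have hsize : (parents.insert ((node.1 + i, node.2 + j) : Int × Int) node).size
          = parents.size + 1 := by
        rw [PySem.Dict.size_insert]; simp [hfreshk]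
      have hnode' : SChain (parents.insert ((node.1 + i, node.2 + j) : Int × Int) node) v node path k :=
        schain_insert hnext hnode
      have hstr : path ++ c.toString
          = path ++ saDiffStr ((node.1 + i, node.2 + j) : Int × Int) node := by
        rw [hdiff (i, j, c) List.mem_cons_self node]
      by_cases hz : ((node.1 + i, node.2 + j) : Int × Int) = ((0 : Int), (0 : Int))
      · rw [hz] at hcont hnext hfreshk hsize hnode' hstr
        simp only [saInner, sbExpand, List.map_cons, hdc, hz, hcont, Bool.false_eq_true,
          if_false, if_true]
        have hch : SChain (parents.insert (((0 : Int), (0 : Int)) : Int × Int) node)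
            (v ++ [(((0 : Int), (0 : Int)) : Int × Int)])
            (((0 : Int), (0 : Int)) : Int × Int)
            (path ++ saDiffStr (((0 : Int), (0 : Int)) : Int × Int) node) (k + 1) :=
          .step _ _ _ _ (PySem.Dict.get?_insert_self _ _ _) (by simp)
            (schain_mono (fun x hx => by simp [hx]) hnode')
        have hev := saBt_eval hch
          ((parents.insert (((0 : Int), (0 : Int)) : Int × Int) node).size + 1)
          (by simp only [hsize]; omega)
        rw [hev, hstr]
      · simp only [saInner, sbExpand, List.map_cons, hdc, hcont, Bool.false_eq_true,
          if_false, hz]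
        have hsub : ∀ x ∈ v, x ∈ v.add ((node.1 + i, node.2 + j) : Int × Int) := by
          intro x hx; rw [PySem.Set.mem_add]; exact Or.inl hx
        have hmemadd : ((node.1 + i, node.2 + j) : Int × Int)
            ∈ v.add ((node.1 + i, node.2 + j) : Int × Int) := by
          rw [PySem.Set.mem_add]; exact Or.inr rfl
        have hq : (pre ++ nxt.map Prod.fst) ++ [((node.1 + i, node.2 + j) : Int × Int)]
            = pre ++ (nxt ++ [((node.1 + i, node.2 + j), path ++ c.toString)]).map Prod.fst := by
          simp
        rw [hq]
        have hent' : ∀ e ∈ ents ++ [((node.1 + i, node.2 + j), path ++ c.toString)],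
            ∃ jj, SChain (parents.insert ((node.1 + i, node.2 + j) : Int × Int) node)
              (v.add ((node.1 + i, node.2 + j) : Int × Int)) e.1 e.2 jj ∧
              jj ≤ (parents.insert ((node.1 + i, node.2 + j) : Int × Int) node).size := by
          intro e he
          rcases List.mem_append.1 he with he | he
          · obtain ⟨jj, hch, hjj⟩ := hent e he
            exact ⟨jj, schain_mono hsub (schain_insert hnext hch), by simp only [hsize]; omega⟩
          · simp only [List.mem_singleton] at he
            subst he
            refine ⟨k + 1, ?_, by simp only [hsize]; omega⟩
            rw [hstr]
            exact .step _ _ _ _ (PySem.Dict.get?_insert_self _ _ _) hmemadd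
              (schain_mono hsub hnode')
        have hkeys' : ∀ x ∈ (parents.insert ((node.1 + i, node.2 + j) : Int × Int) node).keys,
            x ∈ v.add ((node.1 + i, node.2 + j) : Int × Int) := by
          intro x hx
          rcases (PySem.Dict.mem_keys_insert _ _ _ _).1 hx with hx | hx
          · subst hx; exact hmemadd
          · exact hsub _ (hkeys _ hx)
        have hnxt' : ∀ e ∈ nxt ++ [((node.1 + i, node.2 + j), path ++ c.toString)],
            e ∈ ents ++ [((node.1 + i, node.2 + j), path ++ c.toString)] := by
          intro e he
          rcases List.mem_append.1 he with he | he
          · exact List.mem_append.2 (Or.inl (hnxt e he))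
          · exact List.mem_append.2 (Or.inr he)
        have H2 := ih _ _ (nxt ++ [((node.1 + i, node.2 + j), path ++ c.toString)])
          (ents ++ [((node.1 + i, node.2 + j), path ++ c.toString)]) _
          (fun d hd => hdiff d (List.mem_cons_of_mem _ hd))
          (fun d hd => hdelta d (List.mem_cons_of_mem _ hd)) hent' hnxt' hkeys'
          (schain_mono hsub hnode') (by simp only [hsize]; omega)
        rcases hA : saInner node rest (v.add ((node.1 + i, node.2 + j) : Int × Int))
            (parents.insert ((node.1 + i, node.2 + j) : Int × Int) node)
            (pre ++ (nxt ++ [((node.1 + i, node.2 + j), path ++ c.toString)]).map Prod.fst)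
          with ⟨oA, vA, pA, qA⟩
        rcases hB : sbExpand node path (rest.map (fun d => d.2.2))
            (v.add ((node.1 + i, node.2 + j) : Int × Int))
            (nxt ++ [((node.1 + i, node.2 + j), path ++ c.toString)])
          with ⟨oB, vB, qB⟩
        rw [hA, hB] at H2
        cases oA with
        | some rA =>
          cases oB with
          | some rB => exact H2
          | none => exact absurd H2 (by simp)
        | none =>
          cases oB with
          | some rB => exact absurd H2 (by simp)
          | none =>
            obtain ⟨hv, hq', hent2, hkeys2⟩ := H2
            refine ⟨hv, hq', ?_, hkeys2⟩
            intro e he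
            refine hent2 e ?_
            rcases he with he | he
            · exact Or.inl (List.mem_append.2 (Or.inl he))
            · exact Or.inr he

-- one B level = |rest| pops of A's queue
theorem level_sim : ∀ (rest : List ((Int × Int) × String)) (f : Nat)
    (v : PySem.Set (Int × Int)) (parents : PySem.Dict (Int × Int) (Int × Int))
    (nxt : List ((Int × Int) × String)),
    (∀ e, e ∈ rest ∨ e ∈ nxt → ∃ j, SChain parents v e.1 e.2 j ∧ j ≤ parents.size) →
    (∀ x ∈ parents.keys, x ∈ v) →
    (∀ r f' v' nxt', sbLevel f v rest nxt = (some r, f', v', nxt') →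
       saBfs f v parents (rest.map Prod.fst ++ nxt.map Prod.fst) = r) ∧
    (∀ f' v' nxt', sbLevel f v rest nxt = (none, f', v', nxt') →
       ∃ parents', saBfs f v parents (rest.map Prod.fst ++ nxt.map Prod.fst)
           = saBfs f' v' parents' (nxt'.map Prod.fst) ∧
         (∀ e ∈ nxt', ∃ j, SChain parents' v' e.1 e.2 j ∧ j ≤ parents'.size) ∧
         (∀ x ∈ parents'.keys, x ∈ v')) := by
  intro rest
  induction rest with
  | nil =>
    intro f v parents nxt hent hkeys
    constructor
    · intro r f' v' nxt' h
      rw [sbLevel_nil] at h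
      exact absurd h (by simp)
    · intro f' v' nxt' h
      rw [sbLevel_nil] at h
      injection h with h1 h2
      injection h2 with h2 h3
      injection h3 with h3 h4
      subst h2; subst h3; subst h4
      exact ⟨parents, by simp, fun e he => hent e (Or.inr he), hkeys⟩
  | cons p rest ih =>
    intro f v parents nxt hent hkeys
    obtain ⟨node, path⟩ := p
    cases f with
    | zero =>
      constructor
      · intro r f' v' nxt' h
        rw [sbLevel_zero] at h
        obtain ⟨h1, -⟩ := Prod.mk.inj h
        obtain rfl : r = "ERROR" := (Option.some.inj h1).symm
        simp [saBfs]
      · intro f' v' nxt' h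
        rw [sbLevel_zero] at h
        exact absurd h (by simp)
    | succ f =>
      obtain ⟨k, hch, hk⟩ := hent (node, path) (Or.inl (by simp))
      have hcs : ("NSWE".toList) = saDirs.map (fun d => d.2.2) := by decide
      have H := expand_sim saDirs node path v parents (rest.map Prod.fst) nxt
        (rest ++ nxt) k saDirs_diff saDirs_delta
        (fun e he => hent e (by
          rcases List.mem_append.1 he with he | he
          · exact Or.inl (List.mem_cons_of_mem _ he)
          · exact Or.inr he))
        (fun e he => List.mem_append.2 (Or.inr he))
        hkeys hch hk
      constructor
      · intro r f' v' nxt' h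
        rw [sbLevel_succ, hcs] at h
        rcases he : sbExpand node path (saDirs.map (fun d => d.2.2)) v nxt with ⟨o, v2, nxt2⟩
        rw [he] at h
        rcases ha : saInner node saDirs v parents (rest.map Prod.fst ++ nxt.map Prod.fst)
          with ⟨oA, vA, pA, qA⟩
        rw [ha, he] at H
        cases o with
        | some r2 =>
          injection h with h1 h2
          injection h1 with h1
          subst h1
          cases oA with
          | some rA =>
            simp only [List.map_cons, List.cons_append, saBfs, ha]
            exact H
          | none => exact absurd H (by simp)
        | none =>
          cases oA with
          | some rA => exact absurd H (by simp)
          | none =>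
            obtain ⟨hv, hq, hent2, hkeys2⟩ := H
            subst hv
            simp only [List.map_cons, List.cons_append, saBfs, ha, hq]
            exact (ih f _ pA nxt2
              (fun e he => hent2 e (by
                rcases he with he | he
                · exact Or.inl (List.mem_append.2 (Or.inl he))
                · exact Or.inr he))
              hkeys2).1 r f' v' nxt' h
      · intro f' v' nxt' h
        rw [sbLevel_succ, hcs] at h
        rcases he : sbExpand node path (saDirs.map (fun d => d.2.2)) v nxt with ⟨o, v2, nxt2⟩
        rw [he] at h
        rcases ha : saInner node saDirs v parents (rest.map Prod.fst ++ nxt.map Prod.fst)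
          with ⟨oA, vA, pA, qA⟩
        rw [ha, he] at H
        cases o with
        | some r2 => simp at h
        | none =>
          cases oA with
          | some rA => exact absurd H (by simp)
          | none =>
            obtain ⟨hv, hq, hent2, hkeys2⟩ := H
            subst hv
            obtain ⟨parents', heq, hinv⟩ := (ih f _ pA nxt2
              (fun e he => hent2 e (by
                rcases he with he | he
                · exact Or.inl (List.mem_append.2 (Or.inl he))
                · exact Or.inr he))
              hkeys2).2 f' v' nxt' h
            exact ⟨parents', by
              simp only [List.map_cons, List.cons_append, saBfs, ha, hq]; exact heq, hinv⟩

-- the two BFS loops agree run for run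
theorem loop_sim : ∀ (f : Nat) (v : PySem.Set (Int × Int))
    (parents : PySem.Dict (Int × Int) (Int × Int)) (frontier : List ((Int × Int) × String)),
    (∀ e ∈ frontier, ∃ j, SChain parents v e.1 e.2 j ∧ j ≤ parents.size) →
    (∀ x ∈ parents.keys, x ∈ v) →
    saBfs f v parents (frontier.map Prod.fst) = sbLoop f v frontier := by
  intro f
  induction f using Nat.strong_induction_on with
  | _ f ihf =>
    intro v parents frontier hent hkeys
    cases frontier with
    | nil =>
      rw [sbLoop]
      cases f <;> rfl
    | cons p fr =>
      rw [sbLoop]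
      have L := level_sim (p :: fr) f v parents []
        (fun e he => hent e (he.resolve_right (by simp))) hkeys
      rcases h : sbLevel f v (p :: fr) [] with ⟨o, f', v', nxt'⟩
      cases o with
      | some r =>
        have := L.1 r f' v' nxt' h
        simpa using this
      | none =>
        obtain ⟨parents', heq, hent', hkeys'⟩ := L.2 f' v' nxt' h
        have hlt : f' < f := sbLevel_fuel_lt p fr f v [] f' v' nxt' h
        calc saBfs f v parents ((p :: fr).map Prod.fst)
            = saBfs f v parents ((p :: fr).map Prod.fst ++ ([] : List ((Int × Int) × String)).map Prod.fst) := by simp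
          _ = saBfs f' v' parents' (nxt'.map Prod.fst) := heq
          _ = sbLoop f' v' nxt' := ihf f' hlt v' parents' nxt' hent' hkeys'

-- the two onward walks agree: same endpoint, same visited set
theorem saStep_delta : ∀ (c : Char) (xy : Int × Int),
    saStep xy c = (xy.1 + (sbDelta.getD c (0, 0)).1, xy.2 + (sbDelta.getD c (0, 0)).2) := by
  intro c xy
  by_cases hN : c = 'N'
  · subst hN
    simp [saStep, show sbDelta.getD 'N' (0, 0) = ((0 : Int), (1 : Int)) from by decide]
  by_cases hS : c = 'S'
  · subst hS
    simp [saStep, hN, show sbDelta.getD 'S' (0, 0) = ((0 : Int), (-1 : Int)) from by decide]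
    ring
  by_cases hE : c = 'E'
  · subst hE
    simp [saStep, hN, hS, show sbDelta.getD 'E' (0, 0) = ((1 : Int), (0 : Int)) from by decide]
  by_cases hW : c = 'W'
  · subst hW
    simp [saStep, hN, hS, hE, show sbDelta.getD 'W' (0, 0) = ((-1 : Int), (0 : Int)) from by decide]
    ring
  · have hni : sbDelta.getD c (0, 0) = ((0 : Int), (0 : Int)) := by
      have h1 : ('N' == c) = false := by simp [Ne.symm hN]
      have h2 : ('S' == c) = false := by simp [Ne.symm hS]
      have h3 : ('E' == c) = false := by simp [Ne.symm hE]
      have h4 : ('W' == c) = false := by simp [Ne.symm hW]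
      simp [sbDelta, PySem.Dict.getD_eq_get?_getD, h1, h2, h3, h4,
        PySem.Dict.get?]
    simp [saStep, hN, hS, hE, hW, hni]

theorem walk_sim : ∀ (cs : List Char) (xy : Int × Int) (trail : List (Int × Int)),
    saWalk cs (PySem.Set.ofList trail) xy
      = (PySem.Set.ofList (sbTrail cs xy trail).2, (sbTrail cs xy trail).1) := by
  intro cs
  induction cs with
  | nil => intro xy trail; rfl
  | cons c cs ih =>
    intro xy trail
    simp only [saWalk, sbTrail, saStep_delta c xy]
    rw [← PySem.Set.ofList_append_singleton]
    exact ih _ _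

theorem saWalk_snd_mem : ∀ (cs : List Char) (v : PySem.Set (Int × Int)) (p : Int × Int),
    cs ≠ [] → (saWalk cs v p).2 ∈ (saWalk cs v p).1 := by
  intro cs
  induction cs with
  | nil => intro _ _ h; exact absurd rfl h
  | cons c cs ih =>
    intro v p _
    cases cs with
    | nil => simp [saWalk, PySem.Set.mem_add]
    | cons c' cs' => exact ih _ _ (by simp)

-- ===== VERDICT (by name: the statement is the Claim_ definition above) =====
theorem shortest_return_no_repeat_backtrack_spec : Claim_equal_shortest_return_no_repeat_backtrack := by
  intro s _
  unfold Spec_shortest_return_no_repeat_backtrack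
  unfold shortest_return_no_repeat_backtrack shortest_return_no_repeat_backtrack_alt
  by_cases hs : s = ""
  · simp [hs]
  · have hne : s.toList ≠ [] := by
      intro h
      exact hs (String.toList_inj.mp (by rw [h]; rfl))
    have hw : saWalk s.toList PySem.Set.empty (0, 0)
        = (PySem.Set.ofList (sbTrail s.toList (0, 0) []).2, (sbTrail s.toList (0, 0) []).1) :=
      walk_sim s.toList (0, 0) []
    have hmem : (saWalk s.toList PySem.Set.empty (0, 0)).2
        ∈ (saWalk s.toList PySem.Set.empty (0, 0)).1 := saWalk_snd_mem _ _ _ hne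
    simp only [hs, if_false]
    rw [show (saWalk s.toList PySem.Set.empty (0, 0)).1 = PySem.Set.ofList (sbTrail s.toList (0, 0) []).2 from by rw [hw],
      show (saWalk s.toList PySem.Set.empty (0, 0)).2 = (sbTrail s.toList (0, 0) []).1 from by rw [hw]] at hmem ⊢
    exact loop_sim ((20 * s.toList.length + 50) ^ 2)
      (PySem.Set.ofList (sbTrail s.toList (0, 0) []).2) PySem.Dict.empty
      [((sbTrail s.toList (0, 0) []).1, "")]
      (fun e he => by
        simp only [List.mem_singleton] at he
        subst he
        exact ⟨0, .base _ (by simp [PySem.Dict.get?_empty]) hmem, by omega⟩)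
      (by simp [PySem.Dict.keys_empty])
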